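-- pv_equiv track=rewrite | github.com/zhangruotian/leetcode | 树/440. 字典序的第K小数字.py | subtreeCount
-- ===== SOURCE A (Python) =====
-- def subtreeCount(i,n):
--     count=0
--     level_num=1
--     while i<=n:
--         count+=min(level_num,n-i+1)
--         i*=10
--         level_num*=10
--     return count
-- ===== SOURCE B (Python) =====
-- def _digits(x):
--     # number of decimal digits of x (for x >= 1; returns 1 for x < 10)
--     return 1 if x < 10 else 1 + _digits(x // 10)
--
-- def subtreeCount(i, n):
--     # Closed form: all levels below the last one are complete (sizes 1,10,...,10^(K-1)
--     # where K = digits(n)-digits(i)); the last level is clipped at n.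
--     if i > n:
--         return 0
--     K = _digits(n) - _digits(i)
--     pow10 = 10 ** K
--     full = (pow10 - 1) // 9
--     return full + max(0, min(pow10, n - i * pow10 + 1))
-- ===== Notes on version B (the rewrite author's own statement) =====
-- stated objective: alternative
-- what changed: Replaces A's per-level while loop accumulating min(level_num, n-i+1) by a closed-form formula: K = digits(n)-digits(i), the K complete levels contribute (10^K-1)//9 and the last level contributes the clipped term max(0, min(10^K, n - i*10^K + 1)).
import Mathlib
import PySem

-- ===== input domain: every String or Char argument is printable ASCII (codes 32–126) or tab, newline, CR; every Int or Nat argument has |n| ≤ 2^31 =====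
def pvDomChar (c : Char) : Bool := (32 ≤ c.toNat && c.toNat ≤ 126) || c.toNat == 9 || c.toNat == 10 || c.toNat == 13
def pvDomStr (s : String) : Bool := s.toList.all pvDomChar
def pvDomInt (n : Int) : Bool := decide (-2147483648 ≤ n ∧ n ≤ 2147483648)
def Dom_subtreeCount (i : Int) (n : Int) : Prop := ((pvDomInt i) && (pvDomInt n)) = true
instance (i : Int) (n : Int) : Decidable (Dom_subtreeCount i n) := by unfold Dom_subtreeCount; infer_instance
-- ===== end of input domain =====

-- B replaces A's per-level while loop by a closed-form digit-count formula (objective: alternative).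

-- ===== PORT A =====
-- A's while loop; the extra `1 ≤ i` conjunct is a totality guard only: for i ≤ 0 ≤ n the
-- Python loop never terminates, and those inputs are excluded by Pre_subtreeCount.
def subtreeLoopA (n i level count : Int) : Int :=
  if _h : 1 ≤ i ∧ i ≤ n then
    subtreeLoopA n (i * 10) (level * 10) (count + min level (n - i + 1))
  else count
termination_by (n + 1 - i).toNat
decreasing_by omega

def subtreeCount (i : Int) (n : Int) : Int := subtreeLoopA n i 1 0

-- ===== PORT B =====
-- B's helper `_digits(x)`: 1 if x < 10 else 1 + _digits(x // 10); `//` on the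
-- recursive branch has both operands nonnegative, where Int `/` equals Python `//`.
def pyDigits (x : Int) : Int :=
  if _h : x < 10 then 1 else 1 + pyDigits (x / 10)
termination_by x.toNat
decreasing_by omega

-- B's closed form; Python's `10 ** K` is only reached with K ≥ 0 (i ≤ n there), ported as
-- `10 ^ K.toNat`; `(pow10 - 1) // 9` has nonnegative operands, ported with PySem.Int.floordiv.
def subtreeCount_alt (i : Int) (n : Int) : Int :=
  if i > n then 0
  else
    let K : Nat := (pyDigits n - pyDigits i).toNat
    let pow10 : Int := 10 ^ K
    let full : Int := PySem.Int.floordiv (pow10 - 1) 9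
    full + max 0 (min pow10 (n - i * pow10 + 1))

-- ===== PRECONDITION & SPEC =====
-- Pre_ excludes exactly the inputs with i ≤ 0 and i ≤ n, on which the Python A loops forever
-- (i*10 never grows past n), so A returns no value there.
def Pre_subtreeCount (i : Int) (n : Int) : Prop := 1 ≤ i ∨ n < i
instance (i : Int) (n : Int) : Decidable (Pre_subtreeCount i n) := by unfold Pre_subtreeCount; infer_instance
def pvWitness_subtreeCount : Int × Int := (1, 100)

def Spec_subtreeCount (i : Int) (n : Int) (out : Int) : Prop := out = subtreeCount_alt i n
instance (i : Int) (n : Int) (out : Int) : Decidable (Spec_subtreeCount i n out) := by unfold Spec_subtreeCount; infer_instance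

-- ===== CLAIM (what is proved, stated in full; the proofs are below) =====
def Claim_equal_subtreeCount : Prop := ∀ (i : Int) (n : Int), Dom_subtreeCount i n → Pre_subtreeCount i n → Spec_subtreeCount i n (subtreeCount i n)

-- ===== LEMMAS AND PROOFS =====

-- The repunit 0, 1, 11, 111, …: value of the K complete levels for level_num = 1.
def repunit : Nat → Int
  | 0 => 0
  | k + 1 => 1 + 10 * repunit k

theorem nine_mul_repunit (k : Nat) : 9 * repunit k = 10 ^ k - 1 := by
  induction k with
  | zero => simp [repunit]
  | succ k ih => rw [repunit]; push_cast [pow_succ]; linarith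

theorem floordiv_repunit (k : Nat) : PySem.Int.floordiv ((10 : Int) ^ k - 1) 9 = repunit k := by
  rw [← nine_mul_repunit k, PySem.Int.floordiv_eq_ediv_of_pos (by omega)]
  exact Int.mul_ediv_cancel_left _ (by omega)

theorem pyDigits_ge_one (x : Int) : 1 ≤ pyDigits x := by
  rw [pyDigits]
  split
  · omega
  · have := pyDigits_ge_one (x / 10)
    omega
termination_by x.toNat
decreasing_by omega

theorem pyDigits_bounds (x : Int) (hx : 1 ≤ x) :
    10 ^ ((pyDigits x).toNat - 1) ≤ x ∧ x < 10 ^ (pyDigits x).toNat := by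
  rw [pyDigits]
  split
  · norm_num
    omega
  · rename_i h
    have h10 : (10 : Int) ≤ x := by omega
    have hq : 1 ≤ x / 10 := by omega
    have ih := pyDigits_bounds (x / 10) hq
    have h1 := pyDigits_ge_one (x / 10)
    set d := pyDigits (x / 10) with hd
    have hdt : (1 + d).toNat = d.toNat + 1 := by omega
    rw [hdt]
    simp only [Nat.add_sub_cancel]
    constructor
    · -- 10 ^ d.toNat = 10 * 10 ^ (d.toNat - 1) ≤ 10 * (x/10) ≤ x
      have hdpos : 1 ≤ d.toNat := by omega
      have : (10 : Int) ^ d.toNat = 10 * 10 ^ (d.toNat - 1) := by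
        rw [← pow_succ']
        congr 1
        omega
      rw [this]
      have := ih.1
      omega
    · -- x ≤ 10*(x/10) + 9 < 10 * 10^d.toNat
      have hlt : x / 10 < 10 ^ d.toNat := ih.2
      have hrem : x < 10 * (x / 10) + 10 := by
        have := Int.emod_emod_of_dvd x (dvd_refl 10)
        have h0 : 0 ≤ x % 10 := Int.emod_nonneg x (by norm_num)
        have h9 : x % 10 < 10 := Int.emod_lt_of_pos x (by norm_num)
        have := Int.ediv_add_emod x 10
        omega
      have : (10 : Int) * (x / 10) + 10 ≤ 10 * 10 ^ d.toNat := by linarith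
      rw [pow_succ]
      linarith
termination_by x.toNat
decreasing_by omega

theorem pyDigits_ten_mul (x : Int) (hx : 1 ≤ x) : pyDigits (10 * x) = 1 + pyDigits x := by
  rw [pyDigits]
  have h : ¬ (10 * x < 10) := by omega
  rw [dif_neg h]
  congr 1
  congr 1
  omega

theorem pyDigits_mono (i n : Int) (hi : 1 ≤ i) (hin : i ≤ n) :
    pyDigits i ≤ pyDigits n := by
  by_contra hlt
  push_neg at hlt
  have hbi := pyDigits_bounds i hi
  have hbn := pyDigits_bounds n (by omega)
  have h1i := pyDigits_ge_one i
  have h1n := pyDigits_ge_one n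
  -- 10^(dn) ≤ 10^(di - 1) ≤ i ≤ n < 10^(dn), contradiction
  have hle : (pyDigits n).toNat ≤ (pyDigits i).toNat - 1 := by omega
  have hpow : (10 : Int) ^ (pyDigits n).toNat ≤ 10 ^ ((pyDigits i).toNat - 1) :=
    pow_le_pow_right₀ (by norm_num) hle
  linarith [hbi.1, hbn.2]

-- A's loop equals the closed form; the invariant `i + level ≤ 10 ^ digits(i)` holds
-- initially (level = 1, i < 10^digits(i)) and is preserved by (i, level) ↦ (10i, 10·level).
theorem loopA_closed (n i level count : Int) (hi : 1 ≤ i) (hl : 1 ≤ level)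
    (hinv : i + level ≤ 10 ^ (pyDigits i).toNat) :
    subtreeLoopA n i level count =
      count + (if i ≤ n then
        level * repunit ((pyDigits n - pyDigits i).toNat) +
        max 0 (min (level * 10 ^ ((pyDigits n - pyDigits i).toNat))
                   (n - i * 10 ^ ((pyDigits n - pyDigits i).toNat) + 1))
      else 0) := by
  by_cases hin : i ≤ n
  · have hmono := pyDigits_mono i n hi hin
    have hbi := pyDigits_bounds i hi
    have hbn := pyDigits_bounds n (by omega)
    have h1i := pyDigits_ge_one i
    have h1n := pyDigits_ge_one n
    rw [subtreeLoopA, dif_pos ⟨hi, hin⟩, if_pos hin]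
    have hd10 : pyDigits (i * 10) = 1 + pyDigits i := by
      rw [mul_comm]; exact pyDigits_ten_mul i hi
    have hinv' : i * 10 + level * 10 ≤ 10 ^ (pyDigits (i * 10)).toNat := by
      rw [hd10]
      have : (1 + pyDigits i).toNat = (pyDigits i).toNat + 1 := by omega
      rw [this, pow_succ]
      nlinarith
    have ih := loopA_closed n (i * 10) (level * 10) (count + min level (n - i + 1))
      (by omega) (by omega) hinv'
    rw [ih]
    by_cases heq : pyDigits i = pyDigits n
    · -- K = 0: this is the last executed level; 10*i > n
      have hK : (pyDigits n - pyDigits i).toNat = 0 := by omega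
      have hstop : ¬ (i * 10 ≤ n) := by
        have : (10 : Int) ^ (pyDigits n).toNat = 10 * 10 ^ ((pyDigits n).toNat - 1) := by
          rw [← pow_succ']; congr 1; omega
        have h1 : n < 10 * 10 ^ ((pyDigits n).toNat - 1) := by rw [← this]; exact hbn.2
        have h2 : (10 : Int) ^ ((pyDigits i).toNat - 1) ≤ i := hbi.1
        have heqn : (pyDigits i).toNat - 1 = (pyDigits n).toNat - 1 := by omega
        rw [heqn] at h2
        nlinarith
      rw [if_neg hstop, hK]
      simp only [repunit, pow_zero, mul_zero, mul_one, zero_add]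
      have hmin : 1 ≤ min level (n - i + 1) := by omega
      omega
    · -- K ≥ 1: this level is complete (i + level - 1 ≤ n)
      have hKpos : pyDigits i + 1 ≤ pyDigits n := by omega
      have hfull : level ≤ n - i + 1 := by
        have hle : (pyDigits i).toNat ≤ (pyDigits n).toNat - 1 := by omega
        have hpow : (10 : Int) ^ (pyDigits i).toNat ≤ 10 ^ ((pyDigits n).toNat - 1) :=
          pow_le_pow_right₀ (by norm_num) hle
        linarith [hbn.1]
      have hminfull : min level (n - i + 1) = level := min_eq_left hfull
      have hK' : (pyDigits n - pyDigits (i * 10)).toNat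
          = (pyDigits n - pyDigits i).toNat - 1 := by rw [hd10]; omega
      have hKt : 1 ≤ (pyDigits n - pyDigits i).toNat := by omega
      set K := (pyDigits n - pyDigits i).toNat with hKdef
      have hKsucc : K = (K - 1) + 1 := by omega
      by_cases hnext : i * 10 ≤ n
      · rw [if_pos hnext, hK']
        have hpw : (10 : Int) ^ K = 10 ^ (K - 1) * 10 := by
          rw [← pow_succ]; congr 1
        have hrep : repunit K = 1 + 10 * repunit (K - 1) := by
          rw [hKsucc]; rfl
        rw [hminfull, hrep, hpw]
        have e1 : level * 10 * 10 ^ (K - 1) = level * (10 ^ (K - 1) * 10) := by ring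
        have e2 : i * 10 * 10 ^ (K - 1) = i * (10 ^ (K - 1) * 10) := by ring
        rw [e1, e2]
        ring
      · -- 10i > n forces K = 1
        have hK1 : K = 1 := by
          by_contra hne
          have hK2 : 2 ≤ (pyDigits n).toNat - (pyDigits i).toNat := by omega
          have hle : (pyDigits i).toNat + 1 ≤ (pyDigits n).toNat - 1 := by omega
          have hpow : (10 : Int) ^ ((pyDigits i).toNat + 1) ≤ 10 ^ ((pyDigits n).toNat - 1) :=
            pow_le_pow_right₀ (by norm_num) hle
          rw [pow_succ] at hpow
          have : i * 10 ≤ n := by nlinarith [hbi.2, hbn.1]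
          exact hnext this
        rw [if_neg hnext, hK1]
        simp only [repunit, pow_one, mul_zero, add_zero, mul_one]
        have hneg : n - i * 10 + 1 ≤ 0 := by omega
        have hmax : max 0 (min (level * 10) (n - i * 10 + 1)) = 0 := by
          have : min (level * 10) (n - i * 10 + 1) ≤ 0 := le_trans (min_le_right _ _) hneg
          omega
        rw [hminfull, hmax]
        omega
  · rw [subtreeLoopA]
    have : ¬ (1 ≤ i ∧ i ≤ n) := fun h => hin h.2
    rw [dif_neg this, if_neg hin]
    omega
termination_by (n + 1 - i).toNat
decreasing_by omega

-- ===== VERDICT (by name: the statement is the Claim_ definition above) =====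
theorem subtreeCount_spec : Claim_equal_subtreeCount := by
  intro i n _ hpre
  unfold Spec_subtreeCount subtreeCount subtreeCount_alt
  by_cases hin : i ≤ n
  · have hi : 1 ≤ i := by
      rcases hpre with h | h
      · exact h
      · omega
    have hbi := pyDigits_bounds i hi
    have hinv : i + 1 ≤ 10 ^ (pyDigits i).toNat := by linarith [hbi.2]
    have h := loopA_closed n i 1 0 hi le_rfl hinv
    rw [h, if_pos hin, if_neg (by omega : ¬ i > n)]
    simp only [one_mul, floordiv_repunit]
    ring
  · rw [subtreeLoopA]
    rw [dif_neg (by omega : ¬ (1 ≤ i ∧ i ≤ n)), if_pos (by omega : i > n)]
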